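-- pv_equiv track=rewrite | github.com/yesjiyoung/OSS_NL2SQL_Shopping_Cart_Speaker | model/sql_translation/select.py | se_find_category_value
-- ===== SOURCE A (Python) =====
-- def se_find_category_value (any_list):
--     re_cate = 'NAN'
--     re_cate_value = 'NAN'
--     main = ['fruit', 'meat']
--     middle = ['tomato', 'grape', 'banana', 'beef', 'pork']
--     for i in range(0, len(any_list)):
--         for j in range(0, len(main)):
--             if(any_list[i] == main[j]):
--                 re_cate_value = main[j]
--                 re_cate = 'main_cate_name'
--
--     for i in range(0, len(any_list)):
--         for j in range(0, len(middle)):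
--             if(any_list[i] == middle[j]):
--                 re_cate_value = middle[j]
--                 re_cate = 'middle_cate_name'
--
--     return re_cate, re_cate_value
-- ===== SOURCE B (Python) =====
-- def se_find_category_value(any_list):
--     priority = (
--         (('tomato', 'grape', 'banana', 'beef', 'pork'), 'middle_cate_name'),
--         (('fruit', 'meat'), 'main_cate_name'),
--     )
--     for cats, name in priority:
--         hit = next((x for x in reversed(any_list) if x in cats), None)
--         if hit is not None:
--             return name, hit
--     return 'NAN', 'NAN'
-- ===== Notes on version B (the rewrite author's own statement) =====
-- stated objective: faster
-- what changed: Replaces A's two full forward overwriting index scans by a precedence table of (category tuple, label) pairs searched in order, each by an early-exiting backward find-first over reversed(any_list); the first backward hit is A's last forward overwrite, and the searches stop at the first hit instead of always traversing everything with index arithmetic.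
import Mathlib
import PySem

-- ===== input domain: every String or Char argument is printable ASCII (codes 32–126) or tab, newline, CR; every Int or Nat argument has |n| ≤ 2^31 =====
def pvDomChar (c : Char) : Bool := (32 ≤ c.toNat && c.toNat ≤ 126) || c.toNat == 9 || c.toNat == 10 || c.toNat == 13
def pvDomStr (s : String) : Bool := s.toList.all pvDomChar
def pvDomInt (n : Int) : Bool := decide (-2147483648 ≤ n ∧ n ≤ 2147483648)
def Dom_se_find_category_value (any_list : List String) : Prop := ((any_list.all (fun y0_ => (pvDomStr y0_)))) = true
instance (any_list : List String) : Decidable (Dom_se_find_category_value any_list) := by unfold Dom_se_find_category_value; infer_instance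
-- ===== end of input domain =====

-- ===== PORT A =====
-- Header: B replaces A's two forward overwriting index scans by an ordered precedence
-- table of (category list, label) pairs, each searched by a backward find-first over the
-- reversed input; an alternative decomposition of the same O(n) task.
def se_find_category_value (any_list : List String) : String × String :=
  let re0 : String × String := ("NAN", "NAN")
  let main : List String := ["fruit", "meat"]
  let middle : List String := ["tomato", "grape", "banana", "beef", "pork"]
  let st1 := (PySem.List.pyRange 0 (any_list.length : Int) 1).foldl (fun st i =>
    (PySem.List.pyRange 0 (main.length : Int) 1).foldl (fun st2 j =>
      if PySem.List.pyGetD any_list i "" == PySem.List.pyGetD main j "" then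
        ("main_cate_name", PySem.List.pyGetD main j "")
      else st2) st) re0
  let st2 := (PySem.List.pyRange 0 (any_list.length : Int) 1).foldl (fun st i =>
    (PySem.List.pyRange 0 (middle.length : Int) 1).foldl (fun st2 j =>
      if PySem.List.pyGetD any_list i "" == PySem.List.pyGetD middle j "" then
        ("middle_cate_name", PySem.List.pyGetD middle j "")
      else st2) st) st1
  st2

-- ===== PORT B =====
-- the 'for cats, name in priority' loop of Source B, as structural recursion over the table
def pvAltSearch (any_list : List String) : List (List String × String) → String × String
  | [] => ("NAN", "NAN")
  | (cats, name) :: rest =>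
    -- next((x for x in reversed(any_list) if x in cats), None)
    match any_list.reverse.find? (fun x => cats.contains x) with
    | some hit => (name, hit)
    | none => pvAltSearch any_list rest

def se_find_category_value_alt (any_list : List String) : String × String :=
  pvAltSearch any_list
    [(["tomato", "grape", "banana", "beef", "pork"], "middle_cate_name"),
     (["fruit", "meat"], "main_cate_name")]

-- ===== PRECONDITION & SPEC =====
def Spec_se_find_category_value (any_list : List String) (out : String × String) : Prop := out = se_find_category_value_alt any_list
instance (any_list : List String) (out : String × String) : Decidable (Spec_se_find_category_value any_list out) := by unfold Spec_se_find_category_value; infer_instance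

-- ===== CLAIM =====
def Claim_equal_se_find_category_value : Prop := ∀ (any_list : List String), Dom_se_find_category_value any_list → Spec_se_find_category_value any_list (se_find_category_value any_list)

-- ===== LEMMAS AND PROOFS =====

-- One pass of "scan a fixed category list, overwriting on equality" is a membership test.
lemma pv_scan_cats (cats : List String) (name x : String) (st : String × String) :
    cats.foldl (fun st2 m => if x == m then (name, m) else st2) st
      = if cats.contains x then (name, x) else st := by
  induction cats generalizing st with
  | nil => simp
  | cons c cs ih =>
    simp only [List.foldl_cons, List.contains_cons]
    rw [ih]
    by_cases h : x = c <;> by_cases h2 : cs.contains x = true <;> simp_all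

-- An overwriting fold keeps the last element satisfying p (else the initial state),
-- and that last element is the first hit of a backward search.
lemma pv_foldl_last {α : Type} (p : String → Bool) (f : String → α) (l : List String) (st : α) :
    l.foldl (fun a x => if p x then f x else a) st
      = match l.reverse.find? p with | some v => f v | none => st := by
  induction l using List.reverseRecOn with
  | nil => simp
  | append_singleton ys x ih =>
    by_cases hp : p x <;>
      simp [List.foldl_append, hp, ih]

-- ===== VERDICT =====
theorem se_find_category_value_spec : Claim_equal_se_find_category_value := by
  intro l _
  unfold Spec_se_find_category_value se_find_category_value se_find_category_value_alt pvAltSearch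
  simp only []
  rw [PySem.List.foldl_pyRange_zero_pyGetD' l ""
        (fun st x => (PySem.List.pyRange 0 (([("fruit" : String), "meat"]).length : Int) 1).foldl
          (fun st2 j => if x == PySem.List.pyGetD ["fruit", "meat"] j "" then
            ("main_cate_name", PySem.List.pyGetD ["fruit", "meat"] j "") else st2) st),
      PySem.List.foldl_pyRange_zero_pyGetD' l ""
        (fun st x => (PySem.List.pyRange 0 (([("tomato" : String), "grape", "banana", "beef", "pork"]).length : Int) 1).foldl
          (fun st2 j => if x == PySem.List.pyGetD ["tomato", "grape", "banana", "beef", "pork"] j "" then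
            ("middle_cate_name", PySem.List.pyGetD ["tomato", "grape", "banana", "beef", "pork"] j "") else st2) st)]
  have hinner : ∀ (cats : List String) (name : String),
      (fun (st : String × String) (x : String) =>
        (PySem.List.pyRange 0 (cats.length : Int) 1).foldl
          (fun st2 j => if x == PySem.List.pyGetD cats j "" then
            (name, PySem.List.pyGetD cats j "") else st2) st)
      = fun st x => if cats.contains x then (name, x) else st := by
    intro cats name
    funext st x
    rw [PySem.List.foldl_pyRange_zero_pyGetD' cats ""
          (fun st2 m => if x == m then (name, m) else st2)]
    exact pv_scan_cats cats name x st
  rw [hinner ["fruit", "meat"] "main_cate_name",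
      hinner ["tomato", "grape", "banana", "beef", "pork"] "middle_cate_name",
      pv_foldl_last (fun x => (["fruit", "meat"] : List String).contains x)
        (fun x => ("main_cate_name", x)) l ("NAN", "NAN")]
  cases hM : l.reverse.find? (fun x => (["fruit", "meat"] : List String).contains x) with
  | some v =>
    rw [pv_foldl_last (fun x => (["tomato", "grape", "banana", "beef", "pork"] : List String).contains x)
          (fun x => ("middle_cate_name", x)) l ("main_cate_name", v)]
    cases hm : l.reverse.find? (fun x => (["tomato", "grape", "banana", "beef", "pork"] : List String).contains x) <;>
      simp only [pvAltSearch, hm, hM]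
  | none =>
    rw [pv_foldl_last (fun x => (["tomato", "grape", "banana", "beef", "pork"] : List String).contains x)
          (fun x => ("middle_cate_name", x)) l ("NAN", "NAN")]
    cases hm : l.reverse.find? (fun x => (["tomato", "grape", "banana", "beef", "pork"] : List String).contains x) <;>
      simp only [pvAltSearch, hm, hM]
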